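-- pv_equiv track=rewrite | github.com/agmontilla/hackerrank_challenges | challenges/collections/counter.py | get_profits
-- ===== SOURCE A (Python) =====
-- from collections import Counter
--
-- def get_profits(shoes: list, asks: list) -> int:
--     """Get the total profit of the shop"""
--     all_shoes = Counter(shoes)
--     total = []
--
--     for size_ask, price in asks:
--         if all_shoes[size_ask]:
--             all_shoes = all_shoes - (Counter([size_ask]))
--             total.append(price)
--
--     return sum(total)
-- ===== SOURCE B (Python) =====
-- from collections import Counter
--
--
-- def get_profits(shoes: list, asks: list) -> int:
--     """Get the total profit of the shop"""
--     inventory = Counter(shoes)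
--     groups = {}
--     for size, price in asks:
--         groups.setdefault(size, []).append(price)
--     total = 0
--     for size, prices in groups.items():
--         total += sum(prices[:inventory[size]])
--     return total
-- ===== Notes on version B (the rewrite author's own statement) =====
-- stated objective: faster
-- what changed: Instead of walking the asks while decrementing a mutable Counter (rebuilding the whole counter via Counter subtraction on every matched ask), B groups the ask prices by shoe size in one pass and then, per size, sums the first inventory[size] prices of that group.
import Mathlib
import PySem

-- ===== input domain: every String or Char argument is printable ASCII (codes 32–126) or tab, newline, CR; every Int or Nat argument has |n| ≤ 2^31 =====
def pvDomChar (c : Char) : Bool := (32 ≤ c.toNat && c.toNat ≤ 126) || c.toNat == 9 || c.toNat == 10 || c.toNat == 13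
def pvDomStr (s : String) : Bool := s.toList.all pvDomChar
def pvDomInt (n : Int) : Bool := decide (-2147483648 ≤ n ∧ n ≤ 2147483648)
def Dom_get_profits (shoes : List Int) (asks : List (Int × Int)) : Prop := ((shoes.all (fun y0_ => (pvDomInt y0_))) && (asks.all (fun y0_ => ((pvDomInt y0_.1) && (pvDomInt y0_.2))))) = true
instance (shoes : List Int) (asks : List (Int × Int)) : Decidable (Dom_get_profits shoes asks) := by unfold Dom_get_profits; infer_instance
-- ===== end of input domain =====

-- B groups the ask prices by size and sums a prefix per size, instead of A's per-ask
-- Counter decrement (whose Counter subtraction rebuilds the counter on every match);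
-- same value, measured faster (objective: faster).

-- ===== PORT A =====
-- A-side helper: `all_shoes - Counter([size_ask])` — Counter subtraction by a single-element
-- counter: the count at s drops by 1 and is removed when no longer positive; exact for the
-- counters A ever subtracts from (all counts nonnegative, count at s nonzero).
def counterSub1 (c : PySem.Dict Int Int) (s : Int) : PySem.Dict Int Int :=
  if 0 < c.getD s 0 - 1 then c.insert s (c.getD s 0 - 1) else c.erase s

def get_profits (shoes : List Int) (asks : List (Int × Int)) : Int :=
  (asks.foldl
    (fun st ask =>
      if st.1.getD ask.1 0 ≠ 0 then (counterSub1 st.1 ask.1, st.2 ++ [ask.2]) else st)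
    (PySem.Dict.counter shoes, ([] : List Int))).2.sum

-- ===== PORT B =====
def get_profits_alt (shoes : List Int) (asks : List (Int × Int)) : Int :=
  ((asks.foldl (fun g p => g.modify p.1 [] (fun ps => ps ++ [p.2]))
      (PySem.Dict.empty : PySem.Dict Int (List Int))).items).foldl
    (fun total sp =>
      total + (PySem.List.slice sp.2 none (some ((PySem.Dict.counter shoes).getD sp.1 0))).sum) 0

-- ===== PRECONDITION & SPEC =====
def Spec_get_profits (shoes : List Int) (asks : List (Int × Int)) (out : Int) : Prop := out = get_profits_alt shoes asks
instance (shoes : List Int) (asks : List (Int × Int)) (out : Int) : Decidable (Spec_get_profits shoes asks out) := by unfold Spec_get_profits; infer_instance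

-- ===== CLAIM (what is proved, stated in full; the proofs are below) =====
def Claim_equal_get_profits : Prop := ∀ (shoes : List Int) (asks : List (Int × Int)), Dom_get_profits shoes asks → Spec_get_profits shoes asks (get_profits shoes asks)

-- ===== LEMMAS AND PROOFS =====

-- prices asked for size s, in ask order
def pvPrices (asks : List (Int × Int)) (s : Int) : List Int :=
  (asks.filter (fun p => p.1 == s)).map (·.2)

-- A's matching loop, abstracted to a counting function
def pvSpecA (f : Int → Int) : List (Int × Int) → Int
  | [] => 0
  | p :: rest =>
    if f p.1 ≠ 0 then p.2 + pvSpecA (fun t => if t = p.1 then f t - 1 else f t) rest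
    else pvSpecA f rest

theorem pv_find?_filter_self (l : List (Int × Int)) (k : Int) :
    List.find? (fun p => p.1 == k) (l.filter (fun p => !(p.1 == k))) = none := by
  rw [List.find?_eq_none]
  intro x hx
  have h := List.of_mem_filter hx
  simp only [Bool.not_eq_eq_eq_not, Bool.not_true, beq_eq_false_iff_ne, ne_eq] at h
  simp [h]

theorem pv_find?_filter_ne (l : List (Int × Int)) (k k' : Int) (hne : k' ≠ k) :
    List.find? (fun p => p.1 == k') (l.filter (fun p => !(p.1 == k)))
      = List.find? (fun p => p.1 == k') l := by
  induction l with
  | nil => rfl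
  | cons p rest ih =>
    rw [List.filter_cons]
    by_cases hpk : p.1 = k
    · have h1 : (!(p.1 == k)) = false := by simp [hpk]
      have h2 : (p.1 == k') = false := by simp [hpk, Ne.symm hne]
      rw [h1, if_neg (by simp), ih, List.find?_cons, h2]
    · have h1 : (!(p.1 == k)) = true := by simp [hpk]
      rw [h1, if_pos rfl, List.find?_cons, List.find?_cons, ih]

theorem pv_getD_erase (d : PySem.Dict Int Int) (k k' : Int) (d0 : Int) :
    (d.erase k).getD k' d0 = if k' = k then d0 else d.getD k' d0 := by
  rcases d with ⟨items⟩
  simp only [PySem.Dict.erase, PySem.Dict.getD, PySem.Dict.get?]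
  by_cases hk : k' = k
  · subst hk
    rw [pv_find?_filter_self, if_pos rfl]
    rfl
  · rw [pv_find?_filter_ne _ _ _ hk, if_neg hk]

theorem pv_getD_counterSub1 (c : PySem.Dict Int Int) (s t : Int)
    (hpos : 1 ≤ c.getD s 0) :
    (counterSub1 c s).getD t 0 = if t = s then c.getD s 0 - 1 else c.getD t 0 := by
  unfold counterSub1
  by_cases h : 0 < c.getD s 0 - 1
  · rw [if_pos h, PySem.Dict.getD_insert]
  · rw [if_neg h, pv_getD_erase]
    by_cases ht : t = s
    · rw [if_pos ht, if_pos ht]; omega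
    · rw [if_neg ht, if_neg ht]

theorem pv_foldA (asks : List (Int × Int)) (c : PySem.Dict Int Int) (total : List Int)
    (hnn : ∀ s, 0 ≤ c.getD s 0) :
    (asks.foldl
      (fun st ask =>
        if st.1.getD ask.1 0 ≠ 0 then (counterSub1 st.1 ask.1, st.2 ++ [ask.2]) else st)
      (c, total)).2.sum
      = total.sum + pvSpecA (fun s => c.getD s 0) asks := by
  induction asks generalizing c total with
  | nil => simp [pvSpecA]
  | cons a rest ih =>
    rw [List.foldl_cons]
    by_cases h : c.getD a.1 0 ≠ 0
    · have hpos : 1 ≤ c.getD a.1 0 := by have := hnn a.1; omega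
      have hfun : (fun s => (counterSub1 c a.1).getD s 0)
          = (fun t => if t = a.1 then c.getD t 0 - 1 else c.getD t 0) := by
        funext t
        rw [pv_getD_counterSub1 c a.1 t hpos]
        by_cases ht : t = a.1
        · rw [if_pos ht, if_pos ht, ht]
        · rw [if_neg ht, if_neg ht]
      have hnn' : ∀ s, 0 ≤ (counterSub1 c a.1).getD s 0 := by
        intro s
        rw [pv_getD_counterSub1 c a.1 s hpos]
        by_cases hs : s = a.1
        · rw [if_pos hs]; omega
        · rw [if_neg hs]; exact hnn s
      show ((rest.foldl _ (if c.getD a.1 0 ≠ 0 then (counterSub1 c a.1, total ++ [a.2]) else (c, total))).2.sum = _)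
      rw [if_pos h, ih _ _ hnn', hfun]
      simp only [pvSpecA, List.sum_append, List.sum_cons, List.sum_nil]
      rw [if_pos h]
      ring
    · show ((rest.foldl _ (if c.getD a.1 0 ≠ 0 then (counterSub1 c a.1, total ++ [a.2]) else (c, total))).2.sum = _)
      rw [if_neg h, ih _ _ hnn]
      simp only [pvSpecA, h, ite_false]

theorem pv_sum_map_update (L : List Int) (hnd : L.Nodup) (s : Int) (hs : s ∈ L)
    (g g' : Int → Int) (p : Int)
    (hne : ∀ t ∈ L, t ≠ s → g t = g' t) (hgs : g s = p + g' s) :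
    (L.map g).sum = p + (L.map g').sum := by
  induction L with
  | nil => cases hs
  | cons x xs ih =>
    rcases List.mem_cons.mp hs with hx | hx
    · have hnotin : s ∉ xs := hx ▸ (List.nodup_cons.mp hnd).1
      have hmap : xs.map g = xs.map g' := by
        apply List.map_congr_left
        intro t ht
        exact hne t (List.mem_cons_of_mem _ ht) (fun hts => hnotin (hts ▸ ht))
      rw [List.map_cons, List.map_cons, List.sum_cons, List.sum_cons, hmap, ← hx, hgs]
      ring
    · have hxs : x ≠ s := fun hxe => (List.nodup_cons.mp hnd).1 (hxe ▸ hx)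
      have hrec := ih (List.nodup_cons.mp hnd).2 hx
        (fun t ht hts => hne t (List.mem_cons_of_mem _ ht) hts)
      rw [List.map_cons, List.map_cons, List.sum_cons, List.sum_cons, hrec,
        hne x List.mem_cons_self hxs]
      ring

theorem pv_prices_cons (a : Int × Int) (rest : List (Int × Int)) (t : Int) :
    pvPrices (a :: rest) t = if t = a.1 then a.2 :: pvPrices rest t else pvPrices rest t := by
  by_cases h : t = a.1
  · subst h; simp [pvPrices]
  · simp [pvPrices, show a.1 ≠ t from fun hh => h hh.symm, h]

theorem pv_specA_eq (asks : List (Int × Int)) (L : List Int) (f : Int → Int)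
    (hnd : L.Nodup) (hmem : ∀ p ∈ asks, p.1 ∈ L) (hnn : ∀ s, 0 ≤ f s) :
    pvSpecA f asks = (L.map (fun s => ((pvPrices asks s).take (f s).toNat).sum)).sum := by
  induction asks generalizing f with
  | nil => simp [pvSpecA, pvPrices]
  | cons a rest ih =>
    have hmem' : ∀ p ∈ rest, p.1 ∈ L := fun p hp => hmem p (List.mem_cons_of_mem _ hp)
    by_cases h : f a.1 = 0
    · simp only [pvSpecA, h, ne_eq, not_true_eq_false, if_false]
      rw [ih f hmem' hnn]
      congr 1
      apply List.map_congr_left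
      intro t ht
      rw [pv_prices_cons]
      by_cases hta : t = a.1
      · rw [if_pos hta, hta, h]
        simp
      · rw [if_neg hta]
    · have h1 : 1 ≤ f a.1 := by have := hnn a.1; omega
      have hnn' : ∀ s, 0 ≤ (fun t => if t = a.1 then f t - 1 else f t) s := by
        intro s
        by_cases hs : s = a.1
        · simp only [hs, if_true]; have := hnn a.1; omega
        · simp only [if_neg hs]; exact hnn s
      simp only [pvSpecA, h, ne_eq, not_false_eq_true, if_true]
      rw [ih _ hmem' hnn']
      refine (pv_sum_map_update L hnd a.1 (hmem a List.mem_cons_self) _ _ a.2 ?_ ?_).symm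
      · intro t ht hta
        rw [pv_prices_cons, if_neg hta]
        simp [hta]
      · rw [pv_prices_cons, if_pos rfl]
        have htn : (f a.1).toNat = (f a.1 - 1).toNat + 1 := by omega
        rw [htn, List.take_succ_cons, List.sum_cons]
        simp

theorem pv_alt_eq (shoes : List Int) (asks : List (Int × Int)) :
    get_profits_alt shoes asks
      = ((PySem.Set.ofList (asks.map Prod.fst)).map
          (fun s => ((pvPrices asks s).take (shoes.count s)).sum)).sum := by
  unfold get_profits_alt
  have hkeys : (asks.foldl (fun g p => g.modify p.1 [] (fun ps => ps ++ [p.2]))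
      (PySem.Dict.empty : PySem.Dict Int (List Int))).keys
      = PySem.Set.ofList (asks.map Prod.fst) := by
    rw [PySem.Dict.keys_foldl_modify_key asks Prod.fst [] (fun _ x ps => ps ++ [x.2]),
      PySem.Dict.keys_empty, PySem.Set.update_nil_left]
  have hget : ∀ c, (asks.foldl (fun g p => g.modify p.1 [] (fun ps => ps ++ [p.2]))
      (PySem.Dict.empty : PySem.Dict Int (List Int))).getD c [] = pvPrices asks c := by
    intro c
    rw [PySem.Dict.getD_foldl_modify_append, PySem.Dict.getD_empty]
    rfl
  have hnd : (asks.foldl (fun g p => g.modify p.1 [] (fun ps => ps ++ [p.2]))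
      (PySem.Dict.empty : PySem.Dict Int (List Int))).keys.Nodup := by
    rw [hkeys]; exact PySem.Set.nodup_ofList _
  rw [PySem.Dict.items_eq_map_keys _ hnd []]
  rw [PySem.List.foldl_add _ (fun sp : Int × List Int =>
    (PySem.List.slice sp.2 none (some ((PySem.Dict.counter shoes).getD sp.1 0))).sum)]
  rw [List.map_map, hkeys]
  rw [zero_add]
  congr 1
  apply List.map_congr_left
  intro s _
  simp only [Function.comp]
  rw [hget s, PySem.Dict.getD_counter, PySem.List.slice_to _ (by positivity)]
  rw [Int.toNat_natCast]

-- ===== VERDICT (by name: the statement is the Claim_ definition above) =====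
theorem get_profits_spec : Claim_equal_get_profits := by
  unfold Claim_equal_get_profits
  intro shoes asks _
  unfold Spec_get_profits
  have hA : get_profits shoes asks
      = pvSpecA (fun s => (PySem.Dict.counter shoes).getD s 0) asks := by
    unfold get_profits
    rw [pv_foldA asks (PySem.Dict.counter shoes) []
      (fun s => by rw [PySem.Dict.getD_counter]; positivity)]
    simp
  rw [hA, pv_specA_eq asks (PySem.Set.ofList (asks.map Prod.fst)) _
    (PySem.Set.nodup_ofList _)
    (fun p hp => (PySem.Set.mem_ofList _ _).mpr (List.mem_map.mpr ⟨p, hp, rfl⟩))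
    (fun s => by rw [PySem.Dict.getD_counter]; positivity), pv_alt_eq]
  congr 1
  apply List.map_congr_left
  intro s _
  rw [PySem.Dict.getD_counter, Int.toNat_natCast]
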